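-- pv_equiv track=rewrite | github.com/Rai220/anima | epoch_2/generation_1/minimal_break.py | first_two_column
-- ===== SOURCE A (Python) =====
-- def abs_diff_row(row):
--     return [abs(row[i+1] - row[i]) for i in range(len(row) - 1)]
--
-- def first_two_column(seq, depth):
--     """Первые два элемента каждой строки."""
--     pairs = [(seq[0], seq[1] if len(seq) > 1 else None)]
--     row = seq[:]
--     for d in range(depth):
--         if len(row) < 2:
--             break
--         row = abs_diff_row(row)
--         pairs.append((row[0], row[1] if len(row) > 1 else None))
--     return pairs
-- ===== SOURCE B (Python) =====
-- def rows_from(row, k):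
--     """The difference-triangle rows starting at `row`, k further levels deep."""
--     if k == 0:
--         return [row]
--     return [row] + rows_from([abs(b - a) for a, b in zip(row, row[1:])], k - 1)
--
-- def first_two_column(seq, depth):
--     """Первые два элемента каждой строки."""
--     levels = max(min(depth, len(seq) - 1), 0)
--     return [(r[0], r[1] if len(r) > 1 else None) for r in rows_from(list(seq), levels)]
-- ===== Notes on version B (the rewrite author's own statement) =====
-- stated objective: alternative
-- what changed: Replaces the incremental loop with a break and running pair accumulator by a closed-form level count (min/max arithmetic instead of the 'len(row)<2' break), a recursive helper that materialises all difference rows (zip-based comprehension instead of index arithmetic), and a final projection comprehension taking the first two elements of each row.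
import Mathlib
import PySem

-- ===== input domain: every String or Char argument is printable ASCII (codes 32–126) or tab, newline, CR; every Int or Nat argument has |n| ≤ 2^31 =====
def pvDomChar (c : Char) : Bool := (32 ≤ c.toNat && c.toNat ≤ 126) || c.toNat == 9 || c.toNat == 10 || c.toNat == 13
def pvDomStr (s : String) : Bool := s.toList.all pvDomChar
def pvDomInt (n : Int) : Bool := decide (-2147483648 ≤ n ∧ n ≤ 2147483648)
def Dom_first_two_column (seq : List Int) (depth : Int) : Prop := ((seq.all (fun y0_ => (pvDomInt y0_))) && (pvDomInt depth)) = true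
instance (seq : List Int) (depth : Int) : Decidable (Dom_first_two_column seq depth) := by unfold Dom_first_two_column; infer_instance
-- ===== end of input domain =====

-- B replaces A's break-driven incremental loop by a closed-form level count, a recursive
-- builder of all difference rows (zip-based), and a final projection; objective: alternative.


-- ===== PORT A =====
-- abs_diff_row: [abs(row[i+1] - row[i]) for i in range(len(row) - 1)]
def absDiffRowA (row : List Int) : List Int :=
  (PySem.List.pyRange 0 (PySem.List.len row - 1) 1).map
    (fun i => |PySem.List.pyGetD row (i + 1) 0 - PySem.List.pyGetD row i 0|)

-- the 'for d in range(depth): if len(row) < 2: break …' loop; state = (row, pairs)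
def loopA : Nat → List Int → List (Int × Option Int) → List (Int × Option Int)
  | 0, _, pairs => pairs
  | k + 1, row, pairs =>
      if PySem.List.len row < 2 then pairs
      else
        let r := absDiffRowA row
        loopA k r (pairs ++ [(PySem.List.pyGetD r 0 0,
          if PySem.List.len r > 1 then some (PySem.List.pyGetD r 1 0) else none)])

def first_two_column (seq : List Int) (depth : Int) : List (Int × Option Int) :=
  loopA depth.toNat seq
    [(PySem.List.pyGetD seq 0 0,
      if PySem.List.len seq > 1 then some (PySem.List.pyGetD seq 1 0) else none)]

-- ===== PORT B =====
-- rows_from(row, k): [row] + rows_from([abs(b-a) for a,b in zip(row, row[1:])], k-1)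
def rowsFromB : List Int → Nat → List (List Int)
  | row, 0 => [row]
  | row, k + 1 =>
      row :: rowsFromB ((row.zip (PySem.List.slice row (some 1) none)).map
        (fun p => |p.2 - p.1|)) k

def pairB (r : List Int) : Int × Option Int :=
  (PySem.List.pyGetD r 0 0,
   if PySem.List.len r > 1 then some (PySem.List.pyGetD r 1 0) else none)

def first_two_column_alt (seq : List Int) (depth : Int) : List (Int × Option Int) :=
  (rowsFromB seq (max (min depth (PySem.List.len seq - 1)) 0).toNat).map pairB

-- ===== PRECONDITION & SPEC =====
-- Python A raises IndexError on seq = [] (it indexes seq[0] unconditionally); so does B.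
def Pre_first_two_column (seq : List Int) (depth : Int) : Prop := seq ≠ []
instance (seq : List Int) (depth : Int) : Decidable (Pre_first_two_column seq depth) := by unfold Pre_first_two_column; infer_instance
def pvWitness_first_two_column : List Int × Int := ([3, 1, 4, 1, 5], 3)

def Spec_first_two_column (seq : List Int) (depth : Int) (out : List (Int × Option Int)) : Prop := out = first_two_column_alt seq depth
instance (seq : List Int) (depth : Int) (out : List (Int × Option Int)) : Decidable (Spec_first_two_column seq depth out) := by unfold Spec_first_two_column; infer_instance

-- ===== CLAIM (what is proved, stated in full; the proofs are below) =====
def Claim_equal_first_two_column : Prop := ∀ (seq : List Int) (depth : Int), Dom_first_two_column seq depth → Pre_first_two_column seq depth → Spec_first_two_column seq depth (first_two_column seq depth)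

-- ===== LEMMAS AND PROOFS =====

-- A's indexed abs-difference row is B's zip-based one.
theorem absDiffRowA_eq (row : List Int) :
    absDiffRowA row
      = (row.zip (PySem.List.slice row (some 1) none)).map (fun p => |p.2 - p.1|) := by
  rw [PySem.List.slice_from_one]
  apply List.ext_getElem
  · simp [absDiffRowA, PySem.List.len_eq, PySem.List.pyRange_one, List.length_tail]
  · intro i h1 h2
    simp only [absDiffRowA, PySem.List.len_eq, PySem.List.pyRange_one] at h1 ⊢
    simp only [List.getElem_map, List.getElem_range, List.getElem_zip, List.getElem_tail]
    have hi : i < row.length - 1 := by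
      simp at h1; omega
    have h1' : (↑(i + 1) : Int) = (↑i : Int) + 1 := by push_cast; ring
    rw [zero_add, show ((↑i : Int) + 1) = ((↑(i + 1) : Nat) : Int) by push_cast; ring]
    rw [PySem.List.pyGetD_natCast, PySem.List.pyGetD_natCast]
    rw [List.getD_eq_getElem _ _ (by omega), List.getD_eq_getElem _ _ (by omega)]

theorem length_absDiffRowA (row : List Int) :
    (absDiffRowA row).length = row.length - 1 := by
  simp [absDiffRowA, PySem.List.len_eq, PySem.List.pyRange_one]

-- the accumulator of loopA is only appended to
theorem loopA_acc (k : Nat) : ∀ (row : List Int) (ps : List (Int × Option Int)),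
    loopA k row ps = ps ++ loopA k row [] := by
  induction k with
  | zero => intro row ps; simp [loopA]
  | succ k ih =>
    intro row ps
    by_cases h : PySem.List.len row < 2
    · simp only [loopA, if_pos h]
      simp
    · simp only [loopA, if_neg h]
      rw [ih, ih (absDiffRowA row) ([] ++ _)]
      simp

-- main invariant: the first pair plus the loop output is the pair of each of the
-- min (k, length-1) + 1 difference rows.
theorem loopA_eq_rows (k : Nat) : ∀ (row : List Int),
    pairB row :: loopA k row []
      = (rowsFromB row (min k (row.length - 1))).map pairB := by
  induction k with
  | zero => intro row; simp [loopA, rowsFromB]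
  | succ k ih =>
    intro row
    by_cases h : PySem.List.len row < 2
    · simp only [loopA, if_pos h]
      have hlen : row.length ≤ 1 := by
        simp [PySem.List.len_eq] at h; omega
      have : min (k + 1) (row.length - 1) = 0 := by omega
      rw [this]; simp [rowsFromB]
    · have hlen : 2 ≤ row.length := by
        simp [PySem.List.len_eq] at h; omega
      have hmin : min (k + 1) (row.length - 1) = min k (row.length - 2) + 1 := by omega
      rw [hmin]
      simp only [loopA, if_neg h]
      rw [loopA_acc]
      have hih := ih (absDiffRowA row)
      rw [length_absDiffRowA row, show row.length - 1 - 1 = row.length - 2 by omega] at hih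
      simp only [rowsFromB, ← absDiffRowA_eq, List.map_cons, List.nil_append,
        List.singleton_append]
      rw [← hih]
      rfl

-- ===== VERDICT (by name: the statement is the Claim_ definition above) =====
theorem first_two_column_spec : Claim_equal_first_two_column := by
  intro seq depth _ hpre
  unfold Spec_first_two_column first_two_column first_two_column_alt
  have hn : 1 ≤ seq.length := by
    cases seq with
    | nil => exact absurd rfl hpre
    | cons a t => simp
  have hlev : (max (min depth (PySem.List.len seq - 1)) 0).toNat
      = min depth.toNat (seq.length - 1) := by
    simp [PySem.List.len_eq]; omega
  rw [hlev, ← loopA_eq_rows, loopA_acc]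
  rfl
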